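-- pv_equiv track=rewrite | github.com/ryanm8787/RustConsoleTerrain | Project/python/utilities.py | parse_json_raw_to_arr
-- ===== SOURCE A (Python) =====
-- def parse_json_raw_to_arr(json_raw):
--     new_arr = []
--
--     global_counter = 0
--     str_arr = list(json_raw["data"])
--
--     temp_row = []
--     while(global_counter < len(str_arr)):
--         next_counter = str_arr[global_counter]
--         if next_counter == '\n':
--             new_arr.append(temp_row)
--             temp_row = []
--         else:
--             temp_row.append(next_counter)
--
--         global_counter += 1
--
--     return new_arr
-- ===== SOURCE B (Python) =====
-- def parse_json_raw_to_arr(json_raw):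
--     return [list(row) for row in json_raw["data"].split('\n')[:-1]]
-- ===== Notes on version B (the rewrite author's own statement) =====
-- stated objective: idiomatic
-- what changed: Replaces the manual index-driven while loop with char-by-char accumulator state by a single str.split('\n') call followed by a slice dropping the trailing segment and a per-row list() map.
import Mathlib
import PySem

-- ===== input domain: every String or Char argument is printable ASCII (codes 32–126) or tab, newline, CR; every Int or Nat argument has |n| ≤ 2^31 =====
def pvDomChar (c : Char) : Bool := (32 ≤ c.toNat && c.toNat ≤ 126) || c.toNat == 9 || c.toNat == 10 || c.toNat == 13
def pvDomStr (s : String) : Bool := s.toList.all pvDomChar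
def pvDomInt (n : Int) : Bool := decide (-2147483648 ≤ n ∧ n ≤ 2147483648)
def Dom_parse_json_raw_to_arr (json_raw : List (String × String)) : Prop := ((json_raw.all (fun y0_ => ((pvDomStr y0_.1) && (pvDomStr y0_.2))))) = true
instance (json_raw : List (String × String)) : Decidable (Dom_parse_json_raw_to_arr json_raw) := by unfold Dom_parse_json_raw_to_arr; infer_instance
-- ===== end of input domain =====

-- B replaces A's manual index/accumulator loop by str.split('\n'), dropping the
-- trailing segment with [:-1] and mapping each row to its character list (idiomatic).


-- ===== PORT A =====
-- the while loop over str_arr, state (new_arr, temp_row); chars are 1-char strings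
def pvAloop (arr : List String) (new_arr : List (List String)) (temp_row : List String) : List (List String) :=
  match arr with
  | [] => new_arr
  | c :: rest =>
    if c = "\n" then pvAloop rest (new_arr ++ [temp_row]) []
    else pvAloop rest new_arr (temp_row ++ [c])

def parse_json_raw_to_arr (json_raw : List (String × String)) : List (List String) :=
  match json_raw.lookup "data" with
  | none => []  -- KeyError in Python; excluded by Pre_
  | some s => pvAloop (s.toList.map (fun c => String.ofList [c])) [] []

-- ===== PORT B =====
def parse_json_raw_to_arr_alt (json_raw : List (String × String)) : List (List String) :=
  match json_raw.lookup "data" with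
  | none => []  -- KeyError in Python; excluded by Pre_
  | some s =>
    match PySem.Str.split? s "\n" with
    | none => []  -- unreachable: separator "\n" is nonempty
    | some rows =>
      (PySem.List.slice rows none (some (-1))).map (fun r => r.toList.map (fun c => String.ofList [c]))

-- ===== PRECONDITION & SPEC =====
-- Pre_ excludes only dicts without a "data" key, on which A raises KeyError.
def Pre_parse_json_raw_to_arr (json_raw : List (String × String)) : Prop :=
  (json_raw.map Prod.fst).contains "data" = true
instance (json_raw : List (String × String)) : Decidable (Pre_parse_json_raw_to_arr json_raw) := by unfold Pre_parse_json_raw_to_arr; infer_instance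
def pvWitness_parse_json_raw_to_arr : (List (String × String)) := [("data", "ab\nc\n\nd")]

def Spec_parse_json_raw_to_arr (json_raw : List (String × String)) (out : List (List String)) : Prop := out = parse_json_raw_to_arr_alt json_raw
instance (json_raw : List (String × String)) (out : List (List String)) : Decidable (Spec_parse_json_raw_to_arr json_raw out) := by unfold Spec_parse_json_raw_to_arr; infer_instance

-- ===== CLAIM (what is proved, stated in full; the proofs are below) =====
def Claim_equal_parse_json_raw_to_arr : Prop := ∀ (json_raw : List (String × String)), Dom_parse_json_raw_to_arr json_raw → Pre_parse_json_raw_to_arr json_raw → Spec_parse_json_raw_to_arr json_raw (parse_json_raw_to_arr json_raw)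

-- ===== LEMMAS AND PROOFS =====

-- naive splitter: the segments of cs between newlines (always nonempty)
def pvSegs (cs : List Char) : List (List Char) :=
  match cs with
  | [] => [[]]
  | c :: rest =>
    if c = '\n' then [] :: pvSegs rest
    else
      match pvSegs rest with
      | [] => [[]]            -- unreachable: pvSegs is never []
      | r :: rs => (c :: r) :: rs

-- the first segment of xs gets p prepended
def pvPre (p : List Char) (xs : List (List Char)) : List (List Char) :=
  match xs with
  | [] => []
  | r :: rs => (p ++ r) :: rs

theorem pvSegs_ne_nil (cs : List Char) : pvSegs cs ≠ [] := by
  cases cs with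
  | nil => simp [pvSegs]
  | cons c rest =>
    simp only [pvSegs]
    split_ifs
    · simp
    · cases h : pvSegs rest <;> simp

theorem pvGo_eq (fuel : Nat) (l cur : List Char) (acc : List (List Char))
    (h : l.length < fuel) :
    PySem.Chars.splitOn.go ['\n'] fuel l cur acc = acc.reverse ++ pvPre cur.reverse (pvSegs l) := by
  induction fuel generalizing l cur acc with
  | zero => omega
  | succ f ih =>
    cases l with
    | nil => simp [PySem.Chars.splitOn.go, pvSegs, pvPre]
    | cons c rest =>
      by_cases hc : c = '\n'
      · subst hc
        have hpre : List.isPrefixOf ['\n'] ('\n' :: rest) = true := by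
          simp [List.isPrefixOf]
        rw [PySem.Chars.splitOn.go, if_pos hpre]
        simp only [List.length_cons, List.length_nil, List.drop_succ_cons, List.drop_zero]
        rw [ih rest [] (cur.reverse :: acc) (by simpa using Nat.lt_of_succ_lt_succ h)]
        have := pvSegs_ne_nil rest
        cases hs : pvSegs rest with
        | nil => exact absurd hs this
        | cons r rs => simp [pvSegs, pvPre, hs]
      · rw [PySem.Chars.splitOn.go,
            if_neg (by simp only [List.isPrefixOf, Bool.and_eq_true, beq_iff_eq]
                       exact fun hh => hc hh.1.symm)]
        rw [ih rest (c :: cur) acc (by simpa using Nat.lt_of_succ_lt_succ h)]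
        have := pvSegs_ne_nil rest
        cases hs : pvSegs rest with
        | nil => exact absurd hs this
        | cons r rs => simp [pvSegs, pvPre, hs, hc]

theorem pvSplitOn_eq (cs : List Char) :
    PySem.Chars.splitOn cs ['\n'] = pvSegs cs := by
  rw [PySem.Chars.splitOn, pvGo_eq (cs.length + 1) cs [] [] (by omega)]
  have := pvSegs_ne_nil cs
  cases hs : pvSegs cs with
  | nil => exact absurd hs this
  | cons r rs => simp [pvPre]

-- A's loop computed over the char list with a pending row `temp` (strings as 1-char strings)
def pvStrRows (temp : List String) (cs : List Char) : List (List String) :=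
  match cs with
  | [] => []
  | c :: rest =>
    if c = '\n' then temp :: pvStrRows [] rest
    else pvStrRows (temp ++ [String.ofList [c]]) rest

theorem pvAloop_eq (cs : List Char) (new : List (List String)) (temp : List String) :
    pvAloop (cs.map (fun c => String.ofList [c])) new temp = new ++ pvStrRows temp cs := by
  induction cs generalizing new temp with
  | nil => simp [pvAloop, pvStrRows]
  | cons c rest ih =>
    simp only [List.map_cons, pvAloop, pvStrRows]
    have hiff : (String.ofList [c] = "\n") ↔ (c = '\n') := by
      constructor
      · intro h; have := congrArg String.toList h; simpa using this
      · intro h; subst h; rfl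
    by_cases hc : c = '\n'
    · rw [if_pos (hiff.mpr hc), if_pos hc, ih]; simp
    · rw [if_neg (fun h => hc (hiff.mp h)), if_neg hc, ih]

-- first segment of xs (char rows) gets temp prepended, rows rendered as 1-char strings
def pvPreS (temp : List String) (xs : List (List String)) : List (List String) :=
  match xs with
  | [] => []
  | r :: rs => (temp ++ r) :: rs

theorem pvPreS_nil (xs : List (List String)) : pvPreS [] xs = xs := by
  cases xs <;> simp [pvPreS]

theorem pvStrRows_eq (cs : List Char) (temp : List String) :
    pvStrRows temp cs = pvPreS temp (((pvSegs cs).dropLast).map (fun r => r.map (fun c => String.ofList [c]))) := by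
  induction cs generalizing temp with
  | nil => simp [pvStrRows, pvSegs, pvPreS]
  | cons c rest ih =>
    simp only [pvStrRows, pvSegs]
    by_cases hc : c = '\n'
    · rw [if_pos hc, if_pos hc, ih [], pvPreS_nil]
      have hne := pvSegs_ne_nil rest
      simp [pvPreS, List.dropLast_cons_of_ne_nil hne]
    · rw [if_neg hc, if_neg hc, ih (temp ++ [String.ofList [c]])]
      have := pvSegs_ne_nil rest
      cases hs : pvSegs rest with
      | nil => exact absurd hs this
      | cons r rs =>
        simp only
        cases rs with
        | nil => simp [pvPreS]
        | cons r2 rs2 => simp [pvPreS, List.dropLast_cons_of_ne_nil, List.append_assoc]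

theorem pvRows_toList (rows : List String) (segs : List (List Char))
    (h : rows.map String.toList = segs) :
    (PySem.List.slice rows none (some (-1))).map (fun r => r.toList.map (fun c => String.ofList [c]))
      = (segs.dropLast).map (fun r => r.map (fun c => String.ofList [c])) := by
  subst h
  rw [PySem.List.slice_to_neg_one, ← List.map_dropLast, List.map_map]
  simp [Function.comp_def]

-- ===== VERDICT (by name: the statement is the Claim_ definition above) =====
theorem parse_json_raw_to_arr_spec : Claim_equal_parse_json_raw_to_arr := by
  intro json_raw _ hpre
  unfold Spec_parse_json_raw_to_arr parse_json_raw_to_arr parse_json_raw_to_arr_alt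
  cases hl : json_raw.lookup "data" with
  | none =>
    exfalso
    unfold Pre_parse_json_raw_to_arr at hpre
    rw [List.lookup_eq_none_iff] at hl
    simp only [List.contains_eq_mem, decide_eq_true_eq, List.mem_map] at hpre
    obtain ⟨⟨k, v⟩, hkv, hk⟩ := hpre
    have h2 := hl ⟨k, v⟩ hkv
    simp only at hk
    simp [hk] at h2
  | some s =>
    have hsplit : PySem.Str.split? s "\n" = some ((pvSegs s.toList).map (fun r => String.ofList r)) := by
      have h1 : PySem.Chars.split? s.toList "\n".toList = some (pvSegs s.toList) := by
        rw [PySem.Chars.split?]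
        simp [pvSplitOn_eq]
      rw [← PySem.Str.split?_map] at h1
      cases hsp : PySem.Str.split? s "\n" with
      | none => rw [hsp] at h1; simp at h1
      | some rows =>
        rw [hsp] at h1
        simp only [Option.map_some, Option.some.injEq] at h1
        congr 1
        rw [← h1, List.map_map]
        simp [Function.comp_def]
    dsimp only
    rw [hsplit]
    dsimp only
    rw [pvAloop_eq, pvRows_toList _ (pvSegs s.toList) (by simp [Function.comp_def])]
    rw [pvStrRows_eq]
    rw [List.nil_append, pvPreS_nil]
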